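-- pv_equiv track=rewrite | github.com/Laksh8/competitive-programming | hackerearth/Hack the money.py | hack
-- ===== SOURCE A (Python) =====
-- def hack(n,c):
--     if c == n:
--         return "Yes"
--     if c > n:
--         return "No"
--     if c<n:
--         if c*20 <n:
--             return hack(n,c*20)
--         else:
--             return hack(n,c*10)
-- ===== SOURCE B (Python) =====
-- def hack(n, c):
--     # Backwards divisor check: reachable iff c == n, or n is c * 10 * 20**k.
--     if c == n:
--         return "Yes"
--     if c > n:
--         return "No"
--     if n % c != 0:
--         return "No"
--     q = n // c
--     if q % 10 != 0:
--         return "No"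
--     r = q // 10
--     while r % 20 == 0:
--         r //= 20
--     return "Yes" if r == 1 else "No"
-- ===== Notes on version B (the rewrite author's own statement) =====
-- stated objective: alternative
-- what changed: Replaces A's forward greedy recursion (multiply c by 20 while 20c<n else by 10) with a backwards divisibility test: answer Yes iff c==n or n equals c*10*20^k, checked by dividing n by c, then by 10, then stripping factors of 20.
import Mathlib
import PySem

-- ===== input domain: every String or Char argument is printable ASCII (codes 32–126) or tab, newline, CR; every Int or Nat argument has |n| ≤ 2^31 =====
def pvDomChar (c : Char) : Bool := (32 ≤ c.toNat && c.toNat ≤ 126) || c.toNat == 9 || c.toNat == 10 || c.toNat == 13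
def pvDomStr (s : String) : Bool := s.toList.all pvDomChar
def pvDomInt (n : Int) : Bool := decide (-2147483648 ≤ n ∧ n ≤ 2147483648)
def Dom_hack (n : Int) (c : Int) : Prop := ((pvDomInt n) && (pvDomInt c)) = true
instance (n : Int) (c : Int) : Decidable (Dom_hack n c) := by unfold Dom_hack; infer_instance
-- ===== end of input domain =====

-- B replaces A's greedy ×20/×10 recursion by a backwards divisibility check (n = c·10·20^k);
-- objective: alternative algorithm, same asymptotic cost.

-- ===== PORT A =====
-- A's recursion diverges when c ≤ 0 < n (and for c < n ≤ 0); fuel 64 is ample on Dom ∩ Pre_,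
-- where c ≥ 1 and each call multiplies c by at least 10 while c < n ≤ 2^31 (≤ 11 calls).
def hackGo : Nat → Int → Int → String
  | 0, _, _ => ""
  | fuel+1, n, c =>
    if c = n then "Yes"
    else if c > n then "No"
    else if c < n then
      (if c * 20 < n then hackGo fuel n (c * 20) else hackGo fuel n (c * 10))
    else ""   -- unreachable by trichotomy (Python would fall through to None)

def hack (n : Int) (c : Int) : String := hackGo 64 n c

-- ===== PORT B =====
-- Source B's `while r % 20 == 0: r //= 20`; fuel 64 is ample on Dom, where |r| ≤ 2^31 < 20^64
-- (the Python loop diverges only at r = 0, which no Pre_ input reaches).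
def strip20 : Nat → Int → Int
  | 0, r => r
  | f+1, r => if PySem.Int.mod r 20 = 0 then strip20 f (PySem.Int.floordiv r 20) else r

def hack_alt (n : Int) (c : Int) : String :=
  if c = n then "Yes"
  else if c > n then "No"
  else if PySem.Int.mod n c ≠ 0 then "No"
  else if PySem.Int.mod (PySem.Int.floordiv n c) 10 ≠ 0 then "No"
  else if strip20 64 (PySem.Int.floordiv (PySem.Int.floordiv n c) 10) = 1 then "Yes" else "No"

-- ===== PRECONDITION & SPEC =====
-- Pre_ excludes exactly the inputs where A never returns (c < n with c ≤ 0: the product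
-- never grows past n, so A's recursion overflows the stack — RecursionError).
def Pre_hack (n : Int) (c : Int) : Prop := n ≤ c ∨ 0 < c
instance (n : Int) (c : Int) : Decidable (Pre_hack n c) := by unfold Pre_hack; infer_instance
def pvWitness_hack : Int × Int := (200, 1)

def Spec_hack (n : Int) (c : Int) (out : String) : Prop := out = hack_alt n c
instance (n : Int) (c : Int) (out : String) : Decidable (Spec_hack n c out) := by unfold Spec_hack; infer_instance

-- ===== CLAIM (what is proved, stated in full; the proofs are below) =====
def Claim_equal_hack : Prop := ∀ (n : Int) (c : Int), Dom_hack n c → Pre_hack n c → Spec_hack n c (hack n c)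

-- ===== LEMMAS AND PROOFS =====

theorem hackGo_succ (f : Nat) (n c : Int) : hackGo (f+1) n c =
    (if c = n then "Yes"
     else if c > n then "No"
     else if c < n then
       (if c * 20 < n then hackGo f n (c * 20) else hackGo f n (c * 10))
     else "") := rfl

theorem strip_pow : ∀ (k f : Nat), k ≤ f → strip20 f ((20:Int)^k) = 1 := by
  intro k
  induction k with
  | zero =>
    intro f _
    cases f with
    | zero => simp [strip20]
    | succ f => simp [strip20, PySem.Int.mod]
  | succ k ih =>
    intro f hf
    cases f with
    | zero => omega
    | succ f =>
      have hdvd : PySem.Int.mod ((20:Int)^(k+1)) 20 = 0 := by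
        rw [PySem.Int.mod_eq_zero_iff_dvd]
        exact ⟨20^k, by ring⟩
      have hdiv : PySem.Int.floordiv ((20:Int)^(k+1)) 20 = 20^k := by
        rw [PySem.Int.floordiv_eq_ediv_of_pos (by norm_num), pow_succ, mul_comm]
        exact Int.mul_ediv_cancel_left _ (by norm_num)
      simp only [strip20, if_pos hdvd, hdiv]
      exact ih f (by omega)

theorem strip_eq_one : ∀ (f : Nat) (r : Int), 1 ≤ r → strip20 f r = 1 → ∃ k : Nat, r = (20:Int)^k := by
  intro f
  induction f with
  | zero => intro r _ h; exact ⟨0, by simpa [strip20] using h⟩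
  | succ f ih =>
    intro r hr h
    by_cases hm : PySem.Int.mod r 20 = 0
    · obtain ⟨s, hs⟩ := (PySem.Int.mod_eq_zero_iff_dvd r 20).mp hm
      have hdiv : PySem.Int.floordiv r 20 = s := by
        rw [PySem.Int.floordiv_eq_ediv_of_pos (by norm_num), hs]
        exact Int.mul_ediv_cancel_left _ (by norm_num)
      simp only [strip20, if_pos hm, hdiv] at h
      have hs1 : 1 ≤ s := by omega
      obtain ⟨k, hk⟩ := ih s hs1 h
      exact ⟨k+1, by rw [hs, hk]; ring⟩
    · simp only [strip20, if_neg hm] at h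
      exact ⟨0, by simpa using h⟩

theorem alt_yes (n c : Int) (k : Nat) (hc : 0 < c) (hcn : c < n) (hN : n ≤ 2147483648)
    (h : n = 10 * c * 20^k) : hack_alt n c = "Yes" := by
  have hpow : (0:Int) < 20^k := pow_pos (by norm_num) k
  have hk64 : k ≤ 64 := by
    by_contra hgt
    have h1 : (20:Int)^64 ≤ 20^k := pow_le_pow_right₀ (by norm_num) (by omega)
    have h2 : (20:Int)^k ≤ n := by nlinarith
    norm_num at h1
    omega
  have hmodc : PySem.Int.mod n c = 0 := by
    rw [PySem.Int.mod_eq_zero_iff_dvd]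
    exact ⟨10 * 20^k, by rw [h]; ring⟩
  have hdiv : PySem.Int.floordiv n c = 10 * 20^k := by
    rw [PySem.Int.floordiv_eq_ediv_of_pos hc, h, show 10 * c * 20^k = c * (10 * 20^k) by ring]
    exact Int.mul_ediv_cancel_left _ (by omega)
  have hmod10 : PySem.Int.mod ((10:Int) * 20^k) 10 = 0 := by
    rw [PySem.Int.mod_eq_zero_iff_dvd]
    exact ⟨20^k, rfl⟩
  have hdiv10 : PySem.Int.floordiv ((10:Int) * 20^k) 10 = 20^k := by
    rw [PySem.Int.floordiv_eq_ediv_of_pos (by norm_num)]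
    exact Int.mul_ediv_cancel_left _ (by norm_num)
  unfold hack_alt
  rw [if_neg hcn.ne, if_neg (by omega : ¬ c > n),
      if_neg (not_ne_iff.mpr hmodc),
      if_neg (show ¬ PySem.Int.mod (PySem.Int.floordiv n c) 10 ≠ 0 by rw [hdiv]; exact not_ne_iff.mpr hmod10),
      if_pos (show strip20 64 (PySem.Int.floordiv (PySem.Int.floordiv n c) 10) = 1 by
        rw [hdiv, hdiv10]; exact strip_pow k 64 hk64)]

theorem alt_no (n c : Int) (hc : 0 < c) (hcn : c < n)
    (hnk : ∀ k : Nat, n ≠ 10 * c * 20^k) : hack_alt n c = "No" := by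
  have hne : c ≠ n := hcn.ne
  have hngt : ¬ c > n := by omega
  unfold hack_alt
  rw [if_neg hne, if_neg hngt]
  by_cases hm : PySem.Int.mod n c = 0
  · rw [if_neg (not_ne_iff.mpr hm)]
    have hnq : PySem.Int.floordiv n c * c + PySem.Int.mod n c = n := PySem.Int.floordiv_mul_add_mod n c
    rw [hm] at hnq
    have hq1 : 1 ≤ PySem.Int.floordiv n c := by
      rw [PySem.Int.le_floordiv_iff_mul_le (by omega)]; omega
    by_cases hm10 : PySem.Int.mod (PySem.Int.floordiv n c) 10 = 0
    · rw [if_neg (not_ne_iff.mpr hm10)]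
      have hqm : PySem.Int.floordiv (PySem.Int.floordiv n c) 10 * 10
          + PySem.Int.mod (PySem.Int.floordiv n c) 10 = PySem.Int.floordiv n c :=
        PySem.Int.floordiv_mul_add_mod _ 10
      rw [hm10] at hqm
      have hm1 : 1 ≤ PySem.Int.floordiv (PySem.Int.floordiv n c) 10 := by omega
      rw [if_neg (show ¬ strip20 64 (PySem.Int.floordiv (PySem.Int.floordiv n c) 10) = 1 by
        intro h1
        obtain ⟨k, hk⟩ := strip_eq_one 64 _ hm1 h1
        exact hnk k (by rw [← hnq, ← hqm, hk]; ring))]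
    · rw [if_pos hm10]
  · rw [if_pos hm]

theorem go_eq : ∀ (fuel : Nat) (n c : Int), 0 < c → c < n → n ≤ c * 10^fuel → n ≤ 2147483648 →
    hackGo (fuel+1) n c = hack_alt n c := by
  intro fuel
  induction fuel with
  | zero => intro n c hc hcn hb _; norm_num at hb; omega
  | succ f ih =>
    intro n c hc hcn hb hN
    have hpow : (0:Int) < 10^f := pow_pos (by norm_num) f
    have hne : c ≠ n := hcn.ne
    have hngt : ¬ c > n := by omega
    rw [hackGo_succ (f+1), if_neg hne, if_neg hngt, if_pos hcn]
    by_cases h20 : c * 20 < n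
    · rw [if_pos h20]
      have hb' : n ≤ c * 20 * 10^f := by
        rw [pow_succ] at hb; nlinarith
      rw [ih n (c*20) (by omega) h20 hb' hN]
      by_cases hex : ∃ k : Nat, n = 10 * (c*20) * 20^k
      · obtain ⟨k, hk⟩ := hex
        rw [alt_yes n (c*20) k (by omega) h20 hN hk,
            alt_yes n c (k+1) hc hcn hN (by rw [hk]; ring)]
      · rw [not_exists] at hex
        rw [alt_no n (c*20) (by omega) h20 hex]
        rw [alt_no n c hc hcn ?_]
        intro k h
        match k with
        | 0 => simp at h; omega
        | Nat.succ k => exact hex k (by rw [h, pow_succ]; ring)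
    · rw [if_neg h20]
      have h20' : n ≤ c * 20 := by omega
      rcases lt_trichotomy (c*10) n with h10 | h10 | h10
      · have hb' : n ≤ c * 10 * 10^f := by rw [pow_succ] at hb; nlinarith
        rw [ih n (c*10) (by omega) h10 hb' hN]
        have hA : ∀ k : Nat, n ≠ 10 * (c*10) * 20^k := by
          intro k h
          have ht : (0:Int) < 20^k := pow_pos (by norm_num) k
          nlinarith
        have hB : ∀ k : Nat, n ≠ 10 * c * 20^k := by
          intro k h
          match k with
          | 0 => simp at h; omega
          | Nat.succ k =>
            have ht : (0:Int) < 20^k := pow_pos (by norm_num) k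
            rw [pow_succ] at h; nlinarith
        rw [alt_no n (c*10) (by omega) h10 hA, alt_no n c hc hcn hB]
      · rw [hackGo_succ f, if_pos h10]
        rw [alt_yes n c 0 hc hcn hN (by rw [← h10]; ring)]
      · have hne2 : c*10 ≠ n := by omega
        rw [hackGo_succ f, if_neg hne2, if_pos h10]
        rw [alt_no n c hc hcn ?_]
        intro k h
        match k with
        | 0 => simp at h; omega
        | Nat.succ k =>
          have ht : (0:Int) < 20^k := pow_pos (by norm_num) k
          rw [pow_succ] at h; nlinarith

-- ===== VERDICT (by name: the statement is the Claim_ definition above) =====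
theorem hack_spec : Claim_equal_hack := by
  intro n c hdom hpre
  unfold Spec_hack
  have hN : n ≤ 2147483648 := by
    simp [Dom_hack, pvDomInt] at hdom; omega
  unfold Pre_hack at hpre
  show hackGo (63+1) n c = hack_alt n c
  rcases lt_trichotomy c n with h | h | h
  · have hc : 0 < c := by omega
    have hb : n ≤ c * 10^63 := by
      have h1 : (2147483648:Int) ≤ 10^63 := by norm_num
      have h2 : (1:Int) * 10^63 ≤ c * 10^63 :=
        mul_le_mul_of_nonneg_right (by omega) (by positivity)
      linarith
    exact go_eq 63 n c hc h hb hN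
  · rw [hackGo_succ 63, if_pos h]
    unfold hack_alt
    rw [if_pos h]
  · have hne : c ≠ n := by omega
    rw [hackGo_succ 63, if_neg hne, if_pos h]
    unfold hack_alt
    rw [if_neg hne, if_pos h]
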